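-- pv_equiv track=rewrite | github.com/Billhuang1971/BDFClient | controller/auto.py | bdfMontage
-- ===== SOURCE A (Python) =====
-- def bdfMontage(channels):
--     dgroup = {}
--     for channel in channels:
--         ch = channel.split('-')[0]
--         idx = len(ch) - 1
--         while idx >= 0:
--             if not ch[idx].isdigit():
--                 break
--             idx -= 1
--         key = ch[:idx + 1]
--         if key in dgroup.keys():
--             dgroup[key].append(channel)
--         else:
--             dgroup[key] = [channel]
--     return dgroup
-- ===== SOURCE B (Python) =====
-- def bdfMontage(channels):
--     # key = part before '-' with its trailing digits removed, found by a single
--     # FORWARD scan: cut = 1 + index of the last non-digit character (0 if none).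
--     def prefix_key(channel):
--         head = channel.split('-')[0]
--         cut = 0
--         for i, c in enumerate(head):
--             if not c.isdigit():
--                 cut = i + 1
--         return head[:cut]
--
--     keys = [prefix_key(c) for c in channels]
--     order = []                       # distinct keys in first-appearance order
--     for k in keys:
--         if k not in order:
--             order.append(k)
--     return {k: [c for c, kk in zip(channels, keys) if kk == k] for k in order}
-- ===== Notes on version B (the rewrite author's own statement) =====
-- stated objective: alternative
-- what changed: A builds the dict incrementally (append-or-insert per channel) and finds each key with a backward while-loop over indices; B computes every key with a single forward scan, collects the distinct keys once, and then builds each group by filtering the channel list per key.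
import Mathlib
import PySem

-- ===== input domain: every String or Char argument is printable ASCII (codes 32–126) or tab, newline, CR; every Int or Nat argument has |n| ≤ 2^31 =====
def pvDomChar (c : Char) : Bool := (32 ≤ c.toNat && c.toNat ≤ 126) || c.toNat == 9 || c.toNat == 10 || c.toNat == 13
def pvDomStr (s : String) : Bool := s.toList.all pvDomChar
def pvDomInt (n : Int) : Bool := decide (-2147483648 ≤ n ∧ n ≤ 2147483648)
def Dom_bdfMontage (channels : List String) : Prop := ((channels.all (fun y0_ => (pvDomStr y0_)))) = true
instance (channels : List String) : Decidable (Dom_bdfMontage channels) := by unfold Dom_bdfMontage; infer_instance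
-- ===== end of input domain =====

-- B groups by first collecting the distinct keys (found by a forward scan) and then
-- filtering the list per key, instead of A's incremental dict build with a backward
-- digit-stripping loop; structurally different, not claimed faster.

-- ===== PORT A =====
-- the while-loop 'idx = len(ch)-1; while idx >= 0: if not ch[idx].isdigit(): break; idx -= 1'
-- ported as structural recursion on idx+1 (the loop only ever reads ch[idx] for 0 ≤ idx < len);
-- returns the final idx+1 (a value in [0, len ch])
def pvIdxA (ch : List Char) : Nat → Nat
  | 0 => 0
  | Nat.succ i => if PySem.Chars.isdigit (ch.getD i ' ') then pvIdxA ch i else i + 1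

def pvKeyA (channel : String) : String :=
  -- channel.split('-')[0]: split with a nonempty separator always yields ≥ 1 piece, so [0] is the head
  let ch := (((PySem.Str.split? channel "-").getD []).headD "").toList
  -- ch[:idx+1] with 0 ≤ idx+1 ≤ len ch: the slice is take
  String.ofList (ch.take (pvIdxA ch ch.length))

def bdfMontage (channels : List String) : List (String × List String) :=
  (channels.foldl (fun dgroup channel =>
      let key := pvKeyA channel
      if dgroup.contains key then
        -- dgroup[key].append(channel)
        dgroup.modify key [] (fun v => v ++ [channel])
      else
        dgroup.insert key [channel])
    (PySem.Dict.empty : PySem.Dict String (List String))).items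

-- ===== PORT B =====
-- 'cut = 0; for i, c in enumerate(head): if not c.isdigit(): cut = i + 1'
def pvCutB (head : List Char) : Int :=
  (PySem.List.enumerate head 0).foldl
    (fun cut p => if !(PySem.Chars.isdigit p.2) then p.1 + 1 else cut) 0

def pvKeyB (channel : String) : String :=
  -- channel.split('-')[0]: split with a nonempty separator always yields ≥ 1 piece, so [0] is the head
  let head := (((PySem.Str.split? channel "-").getD []).headD "").toList
  -- head[:cut]
  String.ofList (PySem.List.slice head none (some (pvCutB head)))

def bdfMontage_alt (channels : List String) : List (String × List String) :=
  let keys := channels.map pvKeyB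
  let order := keys.foldl (fun s k => if k ∈ s then s else s ++ [k]) []
  order.map (fun k =>
    (k, ((channels.zip keys).filter (fun p => p.2 == k)).map Prod.fst))

-- ===== PRECONDITION & SPEC =====
def Spec_bdfMontage (channels : List String) (out : List (String × List String)) : Prop := out = bdfMontage_alt channels
instance (channels : List String) (out : List (String × List String)) : Decidable (Spec_bdfMontage channels out) := by unfold Spec_bdfMontage; infer_instance

-- ===== CLAIM (what is proved, stated in full; the proofs are below) =====
def Claim_equal_bdfMontage : Prop := ∀ (channels : List String), Dom_bdfMontage channels → Spec_bdfMontage channels (bdfMontage channels)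

-- ===== LEMMAS AND PROOFS =====

theorem pvIdxA_append (ch : List Char) (a : Char) :
    ∀ n, n ≤ ch.length → pvIdxA (ch ++ [a]) n = pvIdxA ch n := by
  intro n
  induction n with
  | zero => intro _; rfl
  | succ i ih =>
    intro h
    simp only [pvIdxA]
    rw [List.getD_append ch [a] ' ' i (by omega), ih (by omega)]

theorem pvEnumerate_append_singleton (cs : List Char) (a : Char) :
    ∀ s : Int, PySem.List.enumerate (cs ++ [a]) s
      = PySem.List.enumerate cs s ++ [(s + cs.length, a)] := by
  induction cs with
  | nil => intro s; simp [PySem.List.enumerate]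
  | cons x t ih =>
    intro s
    simp only [List.cons_append, PySem.List.enumerate, ih (s + 1), List.length_cons]
    push_cast
    ring_nf

theorem pvFoldEnum (cs : List Char) :
    (PySem.List.enumerate cs 0).foldl
      (fun cut p => if !(PySem.Chars.isdigit p.2) then p.1 + 1 else cut) 0
      = ((pvIdxA cs cs.length : Nat) : Int) := by
  induction cs using List.reverseRecOn with
  | nil => rfl
  | append_singleton cs a ih =>
    have h2 : (cs ++ [a]).length = cs.length + 1 := by simp
    have hget : (cs ++ [a]).getD cs.length ' ' = a := by simp
    rw [pvEnumerate_append_singleton cs a 0, List.foldl_append, h2]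
    simp only [List.foldl_cons, List.foldl_nil, pvIdxA, hget]
    by_cases hd : PySem.Chars.isdigit a
    · rw [if_neg (by simp [hd]), if_pos hd, pvIdxA_append cs a cs.length le_rfl]
      exact ih
    · rw [if_pos (by simp [hd]), if_neg (by simp [hd])]
      push_cast
      ring

theorem pvCutB_eq_idxA (cs : List Char) :
    pvCutB cs = ((pvIdxA cs cs.length : Nat) : Int) := by
  unfold pvCutB; exact pvFoldEnum cs

theorem pvKeyB_eq_keyA : pvKeyB = pvKeyA := by
  funext channel
  simp only [pvKeyA, pvKeyB, pvCutB_eq_idxA]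
  rw [PySem.List.slice_to _ (Int.natCast_nonneg _)]
  simp

-- A's loop body equals an unconditional modify: when the key is absent,
-- modify inserts f([]) = [channel]
theorem pvStep_eq_modify :
    (fun (dgroup : PySem.Dict String (List String)) (channel : String) =>
      let key := pvKeyA channel
      if dgroup.contains key then dgroup.modify key [] (fun v => v ++ [channel])
      else dgroup.insert key [channel])
    = (fun dgroup channel => dgroup.modify (pvKeyA channel) [] (fun v => v ++ [channel])) := by
  funext d c
  by_cases h : d.contains (pvKeyA c)
  · simp [h]
  · simp only [h, Bool.false_eq_true, if_false]
    unfold PySem.Dict.modify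
    rw [PySem.Dict.getD_of_not_contains (h := by simpa using h)]
    simp

theorem pvGetD_fold_modify (l : List String) (d : PySem.Dict String (List String)) (k : String) :
    (l.foldl (fun d c => d.modify (pvKeyA c) [] (fun v => v ++ [c])) d).getD k []
      = d.getD k [] ++ l.filter (fun c => pvKeyA c == k) := by
  induction l generalizing d with
  | nil => simp
  | cons c t ih =>
    simp only [List.foldl_cons, ih, List.filter_cons]
    rw [PySem.Dict.getD_modify]
    by_cases h : pvKeyA c = k
    · simp [h]
    · simp [h, Ne.symm h]

theorem pvZip_filter (l : List String) (f : String → String) (k : String) :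
    ((l.zip (l.map f)).filter (fun p => p.2 == k)).map Prod.fst
      = l.filter (fun c => f c == k) := by
  induction l with
  | nil => rfl
  | cons c t ih =>
    simp only [List.map_cons, List.zip_cons_cons, List.filter_cons]
    by_cases h : f c == k
    · simp [h, ih]
    · simp [h, ih]

theorem pvFoldl_mem_eq_ofList (ks : List String) :
    ks.foldl (fun s k => if k ∈ s then s else s ++ [k]) [] = PySem.Set.ofList ks := by
  have h : (fun (s : List String) k => if k ∈ s then s else s ++ [k]) = PySem.Set.add := by
    funext s k
    rw [PySem.Set.add_eq_ite]
  rw [h]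
  exact PySem.Set.update_nil_left ks

-- ===== VERDICT (by name: the statement is the Claim_ definition above) =====
theorem bdfMontage_spec : Claim_equal_bdfMontage := by
  intro channels _
  unfold Spec_bdfMontage bdfMontage bdfMontage_alt
  rw [pvStep_eq_modify]
  simp only [pvKeyB_eq_keyA, pvFoldl_mem_eq_ofList]
  have hnd : (channels.foldl
      (fun d c => d.modify (pvKeyA c) [] (fun v => v ++ [c]))
      (PySem.Dict.empty : PySem.Dict String (List String))).keys.Nodup := by
    exact PySem.Dict.nodup_keys_foldl_modify_key channels pvKeyA []
      (fun _ c v => v ++ [c]) _ (by simp [PySem.Dict.keys_empty])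
  rw [PySem.Dict.items_eq_map_keys _ hnd []]
  rw [PySem.Dict.keys_foldl_modify_key channels pvKeyA [] (fun _ c v => v ++ [c]) _]
  rw [PySem.Dict.keys_empty, PySem.Set.update_nil_left]
  apply List.map_congr_left
  intro k _
  rw [pvGetD_fold_modify, pvZip_filter]
  simp
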